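-- pv_equiv track=rewrite | github.com/KrystianMank/coding | algorytmy/liczby_szalone.py | czySzalona
-- ===== SOURCE A (Python) =====
-- def czySzalona(a):
--     l = [0] * 10
--
--     while a > 0:
--         l[a % 10] += 1
--         if l[a % 10] > a % 10:
--             return False
--         a //= 10
--
--     return True
-- ===== SOURCE B (Python) =====
-- def czySzalona(a):
--     if a <= 0:
--         return True
--     digits = []
--     n = a
--     while n > 0:
--         digits.append(n % 10)
--         n //= 10
--     cnt = {}
--     for d in digits:
--         cnt[d] = cnt.get(d, 0) + 1
--     return all(c <= d for d, c in cnt.items())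
-- ===== Notes on version B (the rewrite author's own statement) =====
-- stated objective: alternative
-- what changed: A interleaves counting and checking in one loop over the digits with an early return and a fixed-size per-digit count array; B first extracts the digit list, then builds a digit->count dictionary in a separate tally pass, and finally verifies count <= digit over the dictionary items in a distinct pass with no early exit.
import Mathlib
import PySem

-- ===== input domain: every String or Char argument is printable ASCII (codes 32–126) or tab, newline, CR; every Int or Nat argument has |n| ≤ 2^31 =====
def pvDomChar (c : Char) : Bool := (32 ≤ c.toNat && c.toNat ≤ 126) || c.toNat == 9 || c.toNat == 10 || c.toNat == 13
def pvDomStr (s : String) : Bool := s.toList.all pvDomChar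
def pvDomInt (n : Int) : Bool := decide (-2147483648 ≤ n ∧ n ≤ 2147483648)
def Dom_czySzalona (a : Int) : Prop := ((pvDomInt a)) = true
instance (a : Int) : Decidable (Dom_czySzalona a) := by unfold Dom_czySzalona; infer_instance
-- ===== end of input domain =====

-- B replaces A's single interleaved count-and-check digit loop (fixed-size count array, early return)
-- by three separate phases — extract the digit list, tally it into a dict, verify count ≤ digit over
-- the dict items; objective: alternative decomposition (same asymptotic cost).

-- ===== PORT A =====
-- termination of the digit loops: a // 10 < a for a > 0
theorem pvFloordivTen_lt (a : Int) (h : 0 < a) :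
    (PySem.Int.floordiv a 10).toNat < a.toNat := by
  rw [PySem.Int.floordiv_eq_ediv_of_pos (by norm_num)]
  have h1 : a / 10 < a := by apply Int.ediv_lt_of_lt_mul (by norm_num); nlinarith
  have h2 : 0 ≤ a / 10 := Int.ediv_nonneg (le_of_lt h) (by norm_num)
  omega

-- A's while loop; the list index a % 10 is nonnegative (mod by positive 10), so `.toNat` of it
-- is exactly Python's index here
def czySzalonaGo (a : Int) (l : List Int) : Bool :=
  if h : 0 < a then
    let d := PySem.Int.mod a 10
    let l' := l.set d.toNat (l.getD d.toNat 0 + 1)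
    if l'.getD d.toNat 0 > d then false
    else czySzalonaGo (PySem.Int.floordiv a 10) l'
  else true
termination_by a.toNat
decreasing_by exact pvFloordivTen_lt a h

def czySzalona (a : Int) : Bool := czySzalonaGo a (List.replicate 10 0)

-- ===== PORT B =====
-- B's digit-extraction while loop (appends n % 10, then n //= 10)
def pyDigits (n : Int) : List Int :=
  if 0 < n then PySem.Int.mod n 10 :: pyDigits (PySem.Int.floordiv n 10) else []
termination_by n.toNat
decreasing_by exact pvFloordivTen_lt n (by assumption)

def czySzalona_alt (a : Int) : Bool :=
  if a ≤ 0 then true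
  else
    let ds := pyDigits a
    let cnt := ds.foldl (fun d x => PySem.Dict.insert d x (PySem.Dict.getD d x 0 + 1)) PySem.Dict.empty
    cnt.items.all (fun p => decide (p.2 ≤ p.1))

-- ===== PRECONDITION & SPEC =====
def Spec_czySzalona (a : Int) (out : Bool) : Prop := out = czySzalona_alt a
instance (a : Int) (out : Bool) : Decidable (Spec_czySzalona a out) := by unfold Spec_czySzalona; infer_instance

-- ===== CLAIM (what is proved, stated in full; the proofs are below) =====
def Claim_equal_czySzalona : Prop := ∀ (a : Int), Dom_czySzalona a → Spec_czySzalona a (czySzalona a)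

-- ===== LEMMAS AND PROOFS =====

theorem pvSet_getD_self (l : List Int) (i : Nat) (v : Int) (h : i < l.length) :
    (l.set i v).getD i 0 = v := by
  simp [List.getD_eq_getElem?_getD, h]

theorem pvSet_getD_ne (l : List Int) (i j : Nat) (v : Int) (h : i ≠ j) :
    (l.set i v).getD j 0 = l.getD j 0 := by
  simp [List.getD_eq_getElem?_getD, h]

-- every extracted digit is in [0, 10)
theorem pyDigits_mem_bounds (n : Int) : ∀ d ∈ pyDigits n, 0 ≤ d ∧ d < 10 := by
  induction n using pyDigits.induct with
  | case1 n h ih =>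
      intro d hd
      rw [pyDigits, if_pos h] at hd
      rcases List.mem_cons.mp hd with rfl | hd
      · exact ⟨PySem.Int.mod_nonneg n (by norm_num), PySem.Int.mod_lt n (by norm_num)⟩
      · exact ih d hd
  | case2 n h =>
      intro d hd
      rw [pyDigits, if_neg h] at hd
      simp at hd

-- unfolding of A's loop in the positive case (lets expanded)
theorem czySzalonaGo_pos (a : Int) (l : List Int) (h : 0 < a) :
    czySzalonaGo a l =
      (if (l.set (PySem.Int.mod a 10).toNat (l.getD (PySem.Int.mod a 10).toNat 0 + 1)).getD (PySem.Int.mod a 10).toNat 0 > PySem.Int.mod a 10 then false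
       else czySzalonaGo (PySem.Int.floordiv a 10) (l.set (PySem.Int.mod a 10).toNat (l.getD (PySem.Int.mod a 10).toNat 0 + 1))) := by
  rw [czySzalonaGo, dif_pos h]

-- characterisation of A's loop: true iff no digit's total (incoming + remaining) count exceeds its value
theorem czySzalonaGo_eq_true_iff (a : Int) :
    ∀ (l : List Int), l.length = 10 → (czySzalonaGo a l = true ↔
      ∀ d ∈ pyDigits a, l.getD d.toNat 0 + ((pyDigits a).count d : Int) ≤ d) := by
  induction a using pyDigits.induct with
  | case2 a h =>
      intro l hl
      rw [czySzalonaGo, dif_neg h, pyDigits, if_neg h]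
      simp
  | case1 a h ih =>
      intro l hl
      have hd0 : 0 ≤ PySem.Int.mod a 10 ∧ PySem.Int.mod a 10 < 10 :=
        ⟨PySem.Int.mod_nonneg a (by norm_num), PySem.Int.mod_lt a (by norm_num)⟩
      set d0 := PySem.Int.mod a 10 with hd0def
      set rest := pyDigits (PySem.Int.floordiv a 10) with hrest
      set l' := l.set d0.toNat (l.getD d0.toNat 0 + 1) with hl'
      have hgself : l'.getD d0.toNat 0 = l.getD d0.toNat 0 + 1 :=
        pvSet_getD_self _ _ _ (by omega)
      have hgne : ∀ d : Int, 0 ≤ d → d < 10 → d ≠ d0 → l'.getD d.toNat 0 = l.getD d.toNat 0 := by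
        intro d h1 h2 h3
        exact pvSet_getD_ne _ _ _ _ (by omega)
      rw [czySzalonaGo_pos a l h, pyDigits, if_pos h, ← hd0def, ← hrest, ← hl']
      by_cases htrip : l'.getD d0.toNat 0 > d0
      · rw [if_pos htrip]
        rw [hgself] at htrip
        constructor
        · intro hfalse; exact absurd hfalse (by simp)
        · intro H
          exfalso
          have := H d0 (List.mem_cons_self ..)
          rw [List.count_cons_self] at this
          push_cast at this
          omega
      · rw [if_neg htrip]
        rw [hgself] at htrip
        rw [ih l' (by simp [hl', hl])]
        constructor
        · intro H d hd
          rcases List.mem_cons.mp hd with rfl | hdm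
          · rw [List.count_cons_self]
            by_cases hmem : d0 ∈ rest
            · have := H d0 hmem
              rw [hgself] at this
              push_cast
              omega
            · rw [List.count_eq_zero_of_not_mem hmem]
              push_cast
              omega
          · by_cases hde : d = d0
            · subst hde
              have := H d0 hdm
              rw [hgself] at this
              rw [List.count_cons_self]
              push_cast at this ⊢
              omega
            · have hb := pyDigits_mem_bounds (PySem.Int.floordiv a 10) d hdm
              have := H d hdm
              rw [hgne d hb.1 hb.2 hde] at this
              rw [List.count_cons_of_ne (fun hc => hde hc.symm)]
              exact this
        · intro H d hd
          by_cases hde : d = d0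
          · subst hde
            have := H d0 (List.mem_cons_self ..)
            rw [List.count_cons_self] at this
            rw [hgself]
            push_cast at this ⊢
            omega
          · have hb := pyDigits_mem_bounds (PySem.Int.floordiv a 10) d hd
            have := H d (List.mem_cons_of_mem _ hd)
            rw [List.count_cons_of_ne (fun hc => hde hc.symm)] at this
            rw [hgne d hb.1 hb.2 hde]
            exact this

-- characterisation of B
theorem czySzalona_alt_eq_true_iff (a : Int) (h : 0 < a) :
    czySzalona_alt a = true ↔ ∀ d ∈ pyDigits a, ((pyDigits a).count d : Int) ≤ d := by
  rw [czySzalona_alt, if_neg (by omega : ¬ a ≤ 0)]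
  simp only [PySem.Dict.foldl_insert_getD_add_one_eq_counter, PySem.Dict.items_counter]
  simp [List.all_map, List.all_eq_true, PySem.Set.mem_ofList]

theorem pvReplicate_getD (i : Nat) (h : i < 10) : (List.replicate 10 (0:Int)).getD i 0 = 0 := by
  rw [List.getD_eq_getElem?_getD, List.getElem?_replicate]
  simp [h]

-- ===== VERDICT (by name: the statement is the Claim_ definition above) =====
theorem czySzalona_spec : Claim_equal_czySzalona := by
  intro a _
  unfold Spec_czySzalona
  by_cases h : 0 < a
  · rw [Bool.eq_iff_iff]
    rw [czySzalona, czySzalonaGo_eq_true_iff a _ (by simp), czySzalona_alt_eq_true_iff a h]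
    constructor
    · intro H d hd
      have := H d hd
      have hb := pyDigits_mem_bounds a d hd
      rw [pvReplicate_getD _ (by omega)] at this
      omega
    · intro H d hd
      have hb := pyDigits_mem_bounds a d hd
      rw [pvReplicate_getD _ (by omega)]
      have := H d hd
      omega
  · rw [czySzalona, czySzalonaGo, dif_neg h, czySzalona_alt, if_pos (by omega)]
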